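-- pv_equiv track=rewrite | github.com/uathena1991/Album_server | album_api/model_evaluation.py | img_label_2_clusters
-- ===== SOURCE A (Python) =====
-- def img_label_2_clusters(img_labels):
--     """
--
--     :param img_labels:
--     :return:
--     """
--     res = {}
--     for k,v in img_labels.items():
--         if ''.join(v) not in res:
--             res[''.join(v)] = [k]
--         else:
--             res[''.join(v)].append(k)
--     return res
-- ===== SOURCE B (Python) =====
-- def img_label_2_clusters(img_labels):
--     items = list(img_labels.items())
--     joined = [''.join(v) for _, v in items]
--     return {j: [k for k, v in items if ''.join(v) == j]
--             for j in dict.fromkeys(joined)}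
-- ===== Notes on version B (the rewrite author's own statement) =====
-- stated objective: alternative
-- what changed: Replaces A's incremental dict accumulation (insert-or-append per item) with a two-pass scheme: dedup the joined strings in first-occurrence order, then build each group by filtering the items for that joined value.
import Mathlib
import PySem

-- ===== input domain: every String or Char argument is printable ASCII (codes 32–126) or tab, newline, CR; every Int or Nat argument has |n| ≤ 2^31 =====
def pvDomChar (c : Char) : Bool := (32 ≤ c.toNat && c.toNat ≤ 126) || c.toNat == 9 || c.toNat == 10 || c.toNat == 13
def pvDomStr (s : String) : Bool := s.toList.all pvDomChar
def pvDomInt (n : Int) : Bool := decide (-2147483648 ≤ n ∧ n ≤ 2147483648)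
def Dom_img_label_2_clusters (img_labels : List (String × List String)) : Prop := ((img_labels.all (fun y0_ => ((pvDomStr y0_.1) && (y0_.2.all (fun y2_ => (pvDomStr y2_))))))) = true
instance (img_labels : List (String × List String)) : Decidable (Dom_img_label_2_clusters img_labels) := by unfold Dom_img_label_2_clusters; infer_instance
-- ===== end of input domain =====

-- B replaces A's incremental insert-or-append dict loop by dedup of the joined strings plus a filter per group (alternative decomposition, same results).
-- Return-value equivalence only (neither program mutates its argument).
-- ===== PORT A =====
-- res = {}; for k,v in items: if ''.join(v) not in res: res[j]=[k] else: res[j].append(k)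
-- (res[j].append(k) on a key known present is ported as modify with default []; exact since the branch guarantees the key is present)
def img_label_2_clusters (img_labels : List (String × List String)) : List (String × List String) :=
  (img_labels.foldl
    (fun (res : PySem.Dict String (List String)) kv =>
      if res.contains (PySem.Str.join "" kv.2) = false then
        res.insert (PySem.Str.join "" kv.2) [kv.1]
      else
        res.modify (PySem.Str.join "" kv.2) [] (fun l => l ++ [kv.1]))
    PySem.Dict.empty).items

-- ===== PORT B =====
def img_label_2_clusters_alt (img_labels : List (String × List String)) : List (String × List String) :=
  let joined := img_labels.map (fun kv => PySem.Str.join "" kv.2)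
  (PySem.List.dedup joined).map (fun j =>
    (j, (img_labels.filter (fun kv => PySem.Str.join "" kv.2 == j)).map (fun kv => kv.1)))

-- ===== PRECONDITION & SPEC =====
def Spec_img_label_2_clusters (img_labels : List (String × List String)) (out : List (String × List String)) : Prop := out = img_label_2_clusters_alt img_labels
instance (img_labels : List (String × List String)) (out : List (String × List String)) : Decidable (Spec_img_label_2_clusters img_labels out) := by unfold Spec_img_label_2_clusters; infer_instance

-- ===== CLAIM (what is proved, stated in full; the proofs are below) =====
def Claim_equal_img_label_2_clusters : Prop := ∀ (img_labels : List (String × List String)), Dom_img_label_2_clusters img_labels → Spec_img_label_2_clusters img_labels (img_label_2_clusters img_labels)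

-- ===== LEMMAS AND PROOFS =====

-- ===== VERDICT (by name: the statement is the Claim_ definition above) =====
-- Each loop step of A is exactly a modify with default [] (insert for a fresh key IS that modify).
theorem pvStepEq (res : PySem.Dict String (List String)) (kv : String × List String) :
    (if res.contains (PySem.Str.join "" kv.2) = false then
        res.insert (PySem.Str.join "" kv.2) [kv.1]
      else
        res.modify (PySem.Str.join "" kv.2) [] (fun l => l ++ [kv.1]))
    = res.modify (PySem.Str.join "" kv.2) [] (fun l => l ++ [kv.1]) := by
  by_cases h : res.contains (PySem.Str.join "" kv.2) = false
  · rw [if_pos h]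
    have hd : res.getD (PySem.Str.join "" kv.2) [] = [] :=
      PySem.Dict.getD_of_not_contains res [] h
    simp [PySem.Dict.modify, hd]
  · rw [if_neg h]

theorem img_label_2_clusters_spec : Claim_equal_img_label_2_clusters := by
  intro xs _
  unfold Spec_img_label_2_clusters img_label_2_clusters img_label_2_clusters_alt
  have hstep : xs.foldl
      (fun (res : PySem.Dict String (List String)) kv =>
        if res.contains (PySem.Str.join "" kv.2) = false then
          res.insert (PySem.Str.join "" kv.2) [kv.1]
        else
          res.modify (PySem.Str.join "" kv.2) [] (fun l => l ++ [kv.1]))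
      PySem.Dict.empty
      = (xs.map (fun p => (PySem.Str.join "" p.2, p.1))).foldl
          (fun (d : PySem.Dict String (List String)) q => d.modify q.1 [] (fun l => l ++ [q.2]))
          PySem.Dict.empty := by
    rw [List.foldl_map]
    exact PySem.List.foldl_congr_mem xs _ _ _ (fun d kv _ => pvStepEq d kv)
  rw [hstep]
  set L := xs.map (fun p => (PySem.Str.join "" p.2, p.1)) with hL
  set D := L.foldl (fun (d : PySem.Dict String (List String)) q => d.modify q.1 [] (fun l => l ++ [q.2])) PySem.Dict.empty with hD
  have hnd : D.keys.Nodup := by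
    rw [hD]
    exact PySem.Dict.nodup_keys_foldl_modify_key L Prod.fst [] (fun d q => fun l => l ++ [q.2]) PySem.Dict.empty (by simp)
  have hkeys : D.keys = PySem.List.dedup (xs.map (fun kv => PySem.Str.join "" kv.2)) := by
    rw [hD]
    rw [PySem.Dict.keys_foldl_modify_key]
    simp [hL, PySem.Set.update_nil_left, List.map_map, Function.comp_def]
  have hget : ∀ c, D.getD c [] = (xs.filter (fun kv => PySem.Str.join "" kv.2 == c)).map (fun kv => kv.1) := by
    intro c
    rw [hD, PySem.Dict.getD_foldl_modify_append, hL]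
    simp [List.filter_map, List.map_map, Function.comp_def]
  rw [PySem.Dict.items_eq_map_keys D hnd [], hkeys]
  apply List.map_congr_left
  intro j _
  rw [hget j]
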